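-- pv_equiv track=rewrite | github.com/pauloamed/STIL2019 | scripts/ad2mm.py | extract_from_sample
-- ===== SOURCE A (Python) =====
-- import string
--
-- def extract_from_sample(sample):
--     converted_sample = []
--     for line in sample.split('\n'):
--         if len(line) > 0 and line[0] == '=':
--             i = 0
--             while line[i] == '=':
--                 i += 1
--             if all(char in string.punctuation or char in '«»' for char in line[i:]):
--                 # line = line.replace('»', '>')
--                 # line = line.replace('«', '<')
--                 converted_sample.append([line[i:],"punct"])
--                 continue
--             else:
--                 while i < len(line) and line[i] != ':':
--                     i+=1
--                 inicio = i
--                 while i < len(line) and line[i] != '\'':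
--                     i+=1
--                 fim = i
--
--                 if max(inicio, fim) < len(line) and line[inicio] == ':' and line[fim] == '\'':
--                     token = line[inicio+1:fim-1]
--                     palavra = line.split()[-1]
--                     converted_sample.append([palavra, token])
--     return converted_sample
-- ===== SOURCE B (Python) =====
-- import string
--
-- _PUNCT = frozenset(string.punctuation + '\u00ab\u00bb')
--
--
-- def extract_from_sample(sample):
--     out = []
--     for line in sample.split('\n'):
--         if not line.startswith('='):
--             continue
--         # one pass over the line: a small state machine computes every field at once
--         in_eq = True        # still inside the leading '=' run
--         allp = True         # every char after the '=' run is punctuation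
--         rest = ''           # the chars after the '=' run
--         seen_colon = False
--         seen_quote = False
--         tok = ''            # chars strictly between the ':' and the "'"
--         word = last = ''    # current / most recently closed whitespace-separated word
--         for c in line:
--             if c.isspace():
--                 last = word or last
--                 word = ''
--             else:
--                 word += c
--             if in_eq:
--                 if c == '=':
--                     continue
--                 in_eq = False
--             rest += c
--             allp = allp and c in _PUNCT
--             if not seen_colon:
--                 if c == ':':
--                     seen_colon = True
--             elif not seen_quote:
--                 if c == "'":
--                     seen_quote = True
--                 else:
--                     tok += c
--         if allp:
--             out.append([rest, 'punct'])
--         elif seen_quote: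
--             out.append([word or last, tok[:-1]])
--     return out
-- ===== Notes on version B (the rewrite author's own statement) =====
-- stated objective: alternative
-- what changed: A's five staged per-line scans (the '='-skipping while loop, the all()-punctuation pass, two find-style while loops and split()) are replaced by a single pass over each line: a state machine whose accumulator tracks the '='-run phase, the punctuation flag, colon/quote detection, the token buffer and the last whitespace-separated word simultaneously.
-- outside the precondition, e.g. on extract_from_sample('='): A raises IndexError, B returns [['', 'punct']]
import Mathlib
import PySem

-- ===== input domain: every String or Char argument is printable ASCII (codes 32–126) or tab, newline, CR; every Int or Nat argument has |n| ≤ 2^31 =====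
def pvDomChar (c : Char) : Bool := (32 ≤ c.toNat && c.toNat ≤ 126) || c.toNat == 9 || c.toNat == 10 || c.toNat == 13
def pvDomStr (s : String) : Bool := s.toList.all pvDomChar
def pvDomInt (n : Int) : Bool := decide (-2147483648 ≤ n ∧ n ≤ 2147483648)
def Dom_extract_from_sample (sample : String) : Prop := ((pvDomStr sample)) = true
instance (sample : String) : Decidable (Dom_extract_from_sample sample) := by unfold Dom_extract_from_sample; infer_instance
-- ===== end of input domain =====

-- B replaces A's five staged per-line scans (the '='-skipping while loop, the all()-punctuation
-- pass, two find-style while loops and split()) by ONE pass over each line: a small state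
-- machine computing every field at once (objective: alternative; same cost).

-- shared constant: string.punctuation plus '«»' (the same membership test both Pythons make)
def pvPunct : List Char := "!\"#$%&'()*+,-./:;<=>?@[\\]^_`{|}~".toList

def pvIsPunct (c : Char) : Bool := c ∈ pvPunct || c ∈ ['«', '»']

-- ===== PORT A =====

-- `while line[i] == '=': i += 1` — the bounds guard only makes the port total; Python A
-- raises IndexError where it would run off the end (excluded by Pre_).
def pvSkipEq (cs : List Char) (i : Nat) : Nat :=
  if h : i < cs.length then
    if cs[i] = '=' then pvSkipEq cs (i + 1) else i
  else i
termination_by cs.length - i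

-- `while i < len(line) and line[i] != c: i += 1`
def pvScanTo (cs : List Char) (c : Char) (i : Nat) : Nat :=
  if h : i < cs.length then
    if cs[i] = c then i else pvScanTo cs c (i + 1)
  else i
termination_by cs.length - i

-- loop body of A's for-loop (one iteration, acc = converted_sample so far)
def pvLineA (acc : List (List String)) (line : String) : List (List String) :=
  let cs := line.toList
  match cs with
  | [] => acc
  | c0 :: _ =>
    if c0 = '=' then
      let i := pvSkipEq cs 0
      if (cs.drop i).all pvIsPunct then
        acc ++ [[String.ofList (cs.drop i), "punct"]]
      else
        let inicio := pvScanTo cs ':' i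
        let fim := pvScanTo cs '\'' inicio
        if max inicio fim < cs.length ∧ cs.getD inicio ' ' = ':' ∧ cs.getD fim ' ' = '\'' then
          let token := String.ofList (PySem.List.slice cs (some ((inicio : Int) + 1)) (some ((fim : Int) - 1)))
          -- line.split()[-1]: split() is nonempty here (line starts with '='), so [-1] never raises
          let palavra := (PySem.Str.split₀ line).getLast?.getD ""
          acc ++ [[palavra, token]]
        else acc
    else acc

def extract_from_sample (sample : String) : List (List String) :=
  ((PySem.Str.split? sample "
").getD []).foldl pvLineA []

-- ===== PORT B =====

-- the per-line single-pass state (Source B's loop variables)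
structure pvSt where
  inEq : Bool
  allp : Bool
  rest : List Char
  seenColon : Bool
  seenQuote : Bool
  tok : List Char
  word : List Char
  last : List Char

def pvInit : pvSt := ⟨true, true, [], false, false, [], [], []⟩

-- one iteration of Source B's `for c in line` loop
def pvStep (s : pvSt) (c : Char) : pvSt :=
  let s := if PySem.Chars.isspace c then
             { s with last := if s.word.isEmpty then s.last else s.word, word := [] }
           else { s with word := s.word ++ [c] }
  if s.inEq && c == '=' then s            -- `continue` inside the leading '=' run
  else
    let s := { s with inEq := false, rest := s.rest ++ [c], allp := s.allp && pvIsPunct c }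
    if !s.seenColon then (if c == ':' then { s with seenColon := true } else s)
    else if !s.seenQuote then
      (if c == '\'' then { s with seenQuote := true } else { s with tok := s.tok ++ [c] })
    else s

def pvLineB (line : String) : Option (List String) :=
  if PySem.Str.startswith line "=" then
    let s := line.toList.foldl pvStep pvInit
    if s.allp then some [String.ofList s.rest, "punct"]
    else if s.seenQuote then
      -- tok[:-1] = drop the last collected char; `word or last` = word if nonempty else last
      some [String.ofList (if s.word.isEmpty then s.last else s.word), String.ofList s.tok.dropLast]
    else none
  else none

def extract_from_sample_alt (sample : String) : List (List String) :=
  ((PySem.Str.split? sample "\n").getD []).filterMap pvLineB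

-- ===== PRECONDITION & SPEC =====
-- Pre_ excludes exactly the samples containing a line made up entirely of '=' characters:
-- there Python A's '='-skipping while loop runs past the end and raises IndexError.
def Pre_extract_from_sample (sample : String) : Prop :=
  ∀ line ∈ (PySem.Str.split? sample "\n").getD [], ¬(line.toList ≠ [] ∧ line.toList.all (· = '='))
instance (sample : String) : Decidable (Pre_extract_from_sample sample) := by
  unfold Pre_extract_from_sample; infer_instance

def pvWitness_extract_from_sample : String := "==n:ta' word\n=!.\nplain"

def Spec_extract_from_sample (sample : String) (out : List (List String)) : Prop := out = extract_from_sample_alt sample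
instance (sample : String) (out : List (List String)) : Decidable (Spec_extract_from_sample sample out) := by unfold Spec_extract_from_sample; infer_instance

-- ===== CLAIM (what is proved, stated in full; the proofs are below) =====
def Claim_equal_extract_from_sample : Prop := ∀ (sample : String), Dom_extract_from_sample sample → Pre_extract_from_sample sample → Spec_extract_from_sample sample (extract_from_sample sample)

-- ===== LEMMAS AND PROOFS =====

-- proof-side bridge: a partition-style per-line parser, proved equal to BOTH ports' line steps
def pvPartition (cs : List Char) (c : Char) : List Char × Bool × List Char :=
  match cs with
  | [] => ([], false, [])
  | d :: rest =>
    if d = c then ([], true, rest)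
    else
      let (pre, f, suf) := pvPartition rest c
      (d :: pre, f, suf)

def pvParseLine (line : String) : Option (List String) :=
  if PySem.Str.startswith line "=" then
    let cs := line.toList
    let rest := cs.dropWhile (· = '=')
    if rest.all pvIsPunct then some [String.ofList rest, "punct"]
    else
      let (_, colon, after) := pvPartition rest ':'
      if colon then
        let (tokenPart, quote, _) := pvPartition after '\''
        if quote then
          some [(PySem.Str.split₀ line).getLast?.getD "", String.ofList tokenPart.dropLast]
        else none
      else none
  else none

theorem pvSkipEq_drop (cs : List Char) (i : Nat) (h : i ≤ cs.length) :
    cs.drop (pvSkipEq cs i) = (cs.drop i).dropWhile (· = '=') ∧ pvSkipEq cs i ≤ cs.length := by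
  unfold pvSkipEq
  split
  · rename_i hlt
    by_cases he : cs[i] = '='
    · have ih := pvSkipEq_drop cs (i + 1) hlt
      rw [if_pos he, List.drop_eq_getElem_cons hlt, List.dropWhile_cons]
      simpa [he] using ih
    · rw [if_neg he, List.drop_eq_getElem_cons hlt, List.dropWhile_cons]
      simp [he, ← List.drop_eq_getElem_cons hlt]
      omega
  · rename_i hge
    have : i = cs.length := by omega
    simp [this]
termination_by cs.length - i

theorem pvScanTo_stop (cs : List Char) (c : Char) : pvScanTo cs c cs.length = cs.length := by
  unfold pvScanTo; simp

theorem pvScanTo_step (cs : List Char) (c : Char) (i : Nat) (hlt : i < cs.length)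
    (hne : cs[i] ≠ c) : pvScanTo cs c i = pvScanTo cs c (i + 1) := by
  conv_lhs => rw [pvScanTo]
  rw [dif_pos hlt, if_neg hne]

theorem pvPartition_decomp (c : Char) : ∀ (cs pre suf : List Char),
    pvPartition cs c = (pre, true, suf) → cs = pre ++ c :: suf := by
  intro cs
  induction cs with
  | nil => intro pre suf h; simp [pvPartition] at h
  | cons d rest ih =>
    intro pre suf h
    by_cases hd : d = c
    · simp [pvPartition, hd] at h
      simp [hd, h.1, h.2]
    · rcases hp : pvPartition rest c with ⟨p, f, sfx⟩
      simp only [pvPartition, if_neg hd, hp, Prod.mk.injEq] at h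
      obtain ⟨h1, h2, h3⟩ := h
      subst h2
      have := ih p sfx hp
      simp [← h1, ← h3, this]

theorem pvScanTo_part (c : Char) (cs : List Char) (i : Nat) (h : i ≤ cs.length) :
    (∀ pre suf, pvPartition (cs.drop i) c = (pre, true, suf) →
        pvScanTo cs c i = i + pre.length ∧ cs.drop (i + pre.length) = c :: suf) ∧
    (∀ pre suf, pvPartition (cs.drop i) c = (pre, false, suf) → pvScanTo cs c i = cs.length) := by
  by_cases hlt : i < cs.length
  · have ih := pvScanTo_part c cs (i + 1) hlt
    have hdc := List.drop_eq_getElem_cons hlt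
    by_cases hc : cs[i] = c
    · have hscan : pvScanTo cs c i = i := by
        conv_lhs => rw [pvScanTo]
        rw [dif_pos hlt, if_pos hc]
      constructor
      · intro pre suf hp
        rw [hdc] at hp
        simp only [pvPartition, if_pos hc, Prod.mk.injEq] at hp
        obtain ⟨h1, _, h3⟩ := hp
        refine ⟨by simp [hscan, ← h1], ?_⟩
        rw [← h1]
        simpa [hc, ← h3] using hdc
      · intro pre suf hp
        rw [hdc] at hp
        simp [pvPartition, if_pos hc, Prod.mk.injEq] at hp
    · have hstep := pvScanTo_step cs c i hlt hc
      rcases hp2 : pvPartition (cs.drop (i + 1)) c with ⟨p, f, s⟩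
      constructor
      · intro pre suf hp
        rw [hdc] at hp
        simp only [pvPartition, if_neg hc, hp2, Prod.mk.injEq] at hp
        obtain ⟨h1, h2, h3⟩ := hp
        subst h2
        obtain ⟨ha, hb⟩ := ih.1 p s hp2
        refine ⟨by rw [hstep, ha, ← h1]; simp; omega, ?_⟩
        rw [← h1, ← h3]
        have : i + 1 + p.length = i + (p.length + 1) := by omega
        rw [this] at hb
        exact hb
      · intro pre suf hp
        rw [hdc] at hp
        simp only [pvPartition, if_neg hc, hp2, Prod.mk.injEq] at hp
        obtain ⟨h1, h2, h3⟩ := hp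
        subst h2
        rw [hstep]
        exact ih.2 p s hp2
  · have hi : i = cs.length := by omega
    subst hi
    constructor
    · intro pre suf hp; simp [pvPartition] at hp
    · intro pre suf hp; exact pvScanTo_stop cs c
termination_by cs.length - i

theorem perLine (acc : List (List String)) (line : String) :
    pvLineA acc line = acc ++ (pvParseLine line).toList := by
  rcases hl : line.toList with _ | ⟨c0, tl⟩
  · have hsw2 : PySem.Chars.startswith [] ['='] = false := by decide
    simp [pvLineA, pvParseLine, hl, hsw2]
  · by_cases hc0 : c0 = '='
    · subst hc0
      have hsw : PySem.Str.startswith line "=" = true := by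
        rw [PySem.Str.startswith_eq, hl, PySem.Chars.startswith_iff]
        exact ⟨tl, rfl⟩
      obtain ⟨hdrop, hle⟩ := pvSkipEq_drop ('=' :: tl) 0 (by simp)
      simp only [List.drop_zero] at hdrop
      simp only [pvLineA, pvParseLine, hl, hsw, if_true]
      rw [hdrop]
      by_cases hpunct : (List.dropWhile (fun x => decide (x = '=')) ('=' :: tl)).all pvIsPunct = true
      · rw [if_pos hpunct, if_pos hpunct]; simp
      · rw [if_neg hpunct, if_neg hpunct]
        rcases hp1 : pvPartition (List.dropWhile (fun x => decide (x = '=')) ('=' :: tl)) ':' with ⟨pre1, colon, after⟩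
        obtain ⟨ht1, hf1⟩ := pvScanTo_part ':' ('=' :: tl) (pvSkipEq ('=' :: tl) 0) hle
        cases colon with
        | false =>
          have hfin : pvScanTo ('=' :: tl) ':' (pvSkipEq ('=' :: tl) 0) = ('=' :: tl).length :=
            hf1 pre1 after (by rw [hdrop, hp1])
          rw [if_neg (by
            intro hcond
            have h1 := hcond.1
            rw [hfin, pvScanTo_stop] at h1
            omega)]
          simp
        | true =>
          obtain ⟨hsc1, hdec1⟩ := ht1 pre1 after (by rw [hdrop, hp1])
          have hlt1 : pvSkipEq ('=' :: tl) 0 + pre1.length < ('=' :: tl).length := by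
            by_contra hge
            rw [List.drop_eq_nil_of_le (by omega)] at hdec1
            exact absurd hdec1 (by simp)
          have hdc1 := List.drop_eq_getElem_cons hlt1
          rw [hdc1] at hdec1
          have hget1 : ('=' :: tl)[pvSkipEq ('=' :: tl) 0 + pre1.length] = ':' := List.head_eq_of_cons_eq hdec1
          have hafter : ('=' :: tl).drop (pvSkipEq ('=' :: tl) 0 + pre1.length + 1) = after :=
            List.tail_eq_of_cons_eq hdec1
          have hstep : pvScanTo ('=' :: tl) '\'' (pvSkipEq ('=' :: tl) 0 + pre1.length)
              = pvScanTo ('=' :: tl) '\'' (pvSkipEq ('=' :: tl) 0 + pre1.length + 1) :=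
            pvScanTo_step _ _ _ hlt1 (by rw [hget1]; decide)
          rcases hp2 : pvPartition after '\'' with ⟨pre2, quote, suf2⟩
          obtain ⟨ht2, hf2⟩ := pvScanTo_part '\'' ('=' :: tl) (pvSkipEq ('=' :: tl) 0 + pre1.length + 1) (by omega)
          cases quote with
          | false =>
            have hfin : pvScanTo ('=' :: tl) '\'' (pvSkipEq ('=' :: tl) 0 + pre1.length + 1) = ('=' :: tl).length :=
              hf2 pre2 suf2 (by rw [hafter, hp2])
            rw [if_neg (by
              intro hcond
              have h1 := hcond.1
              rw [hsc1, hstep, hfin] at h1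
              omega)]
            simp
          | true =>
            obtain ⟨hsc2, hdec2⟩ := ht2 pre2 suf2 (by rw [hafter, hp2])
            have hlt2 : pvSkipEq ('=' :: tl) 0 + pre1.length + 1 + pre2.length < ('=' :: tl).length := by
              by_contra hge
              rw [List.drop_eq_nil_of_le (by omega)] at hdec2
              exact absurd hdec2 (by simp)
            have hdc2 := List.drop_eq_getElem_cons hlt2
            rw [hdc2] at hdec2
            have hget2 : ('=' :: tl)[pvSkipEq ('=' :: tl) 0 + pre1.length + 1 + pre2.length] = '\'' :=
              List.head_eq_of_cons_eq hdec2
            have hfimv : pvScanTo ('=' :: tl) '\'' (pvScanTo ('=' :: tl) ':' (pvSkipEq ('=' :: tl) 0))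
                = pvSkipEq ('=' :: tl) 0 + pre1.length + 1 + pre2.length := by
              rw [hsc1, hstep, hsc2]
            have hcond : max (pvScanTo ('=' :: tl) ':' (pvSkipEq ('=' :: tl) 0))
                  (pvScanTo ('=' :: tl) '\'' (pvScanTo ('=' :: tl) ':' (pvSkipEq ('=' :: tl) 0))) < ('=' :: tl).length ∧
                ('=' :: tl).getD (pvScanTo ('=' :: tl) ':' (pvSkipEq ('=' :: tl) 0)) ' ' = ':' ∧
                ('=' :: tl).getD (pvScanTo ('=' :: tl) '\'' (pvScanTo ('=' :: tl) ':' (pvSkipEq ('=' :: tl) 0))) ' ' = '\'' := by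
              refine ⟨by rw [hfimv, hsc1]; omega, ?_, ?_⟩
              · rw [hsc1, List.getD_eq_getElem _ _ hlt1, hget1]
              · rw [hfimv, List.getD_eq_getElem _ _ hlt2, hget2]
            rw [if_pos hcond]
            have hslice : PySem.List.slice ('=' :: tl)
                (some ((pvScanTo ('=' :: tl) ':' (pvSkipEq ('=' :: tl) 0) : Int) + 1))
                (some ((pvScanTo ('=' :: tl) '\'' (pvScanTo ('=' :: tl) ':' (pvSkipEq ('=' :: tl) 0)) : Int) - 1))
                = pre2.dropLast := by
              rw [hfimv, hsc1]
              have e1 : ((pvSkipEq ('=' :: tl) 0 + pre1.length : Nat) : Int) + 1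
                  = ((pvSkipEq ('=' :: tl) 0 + pre1.length + 1 : Nat) : Int) := by push_cast; ring
              have e2 : ((pvSkipEq ('=' :: tl) 0 + pre1.length + 1 + pre2.length : Nat) : Int) - 1
                  = ((pvSkipEq ('=' :: tl) 0 + pre1.length + pre2.length : Nat) : Int) := by push_cast; ring
              rw [e1, e2, PySem.List.slice_natCast]
              have e3 : pvSkipEq ('=' :: tl) 0 + pre1.length + pre2.length - (pvSkipEq ('=' :: tl) 0 + pre1.length + 1)
                  = pre2.length - 1 := by omega
              rw [e3, hafter, pvPartition_decomp '\'' after pre2 suf2 hp2,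
                  List.take_append_of_le_length (by omega), ← List.dropLast_eq_take]
            rw [hslice]
            simp
    · have hsw : PySem.Str.startswith line "=" = false := by
        rw [PySem.Str.startswith_eq, hl]
        rw [Bool.eq_false_iff]
        intro hr
        rw [PySem.Chars.startswith_iff] at hr
        rcases hr with ⟨t, ht⟩
        simp at ht
        exact hc0 ht.1.symm
      have hsw2 : PySem.Chars.startswith (c0 :: tl) ['='] = false := by
        rw [Bool.eq_false_iff]
        intro hr
        rw [PySem.Chars.startswith_iff] at hr
        rcases hr with ⟨t, ht⟩
        simp at ht
        exact hc0 ht.1.symm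
      simp [pvLineA, pvParseLine, hl, hc0, hsw2]

-- ——— B-side: characterising the single-pass fold ———

-- last-word recursion (proof helper: the (word,last) components of the fold)
def pvWordFold (cs : List Char) (w l : List Char) : List Char :=
  match cs with
  | [] => if w.isEmpty then l else w
  | c :: rest =>
    if PySem.Chars.isspace c then pvWordFold rest [] (if w.isEmpty then l else w)
    else pvWordFold rest (w ++ [c]) l

theorem pvStep_word (s : pvSt) (c : Char) :
    (pvStep s c).word = if PySem.Chars.isspace c then [] else s.word ++ [c] := by
  unfold pvStep
  by_cases h : PySem.Chars.isspace c <;> simp [h] <;> split_ifs <;> rfl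

theorem pvStep_last (s : pvSt) (c : Char) :
    (pvStep s c).last = if PySem.Chars.isspace c then (if s.word.isEmpty then s.last else s.word) else s.last := by
  unfold pvStep
  by_cases h : PySem.Chars.isspace c <;> simp [h] <;> split_ifs <;> rfl

theorem foldl_word : ∀ (cs : List Char) (s : pvSt),
    (if (cs.foldl pvStep s).word.isEmpty then (cs.foldl pvStep s).last else (cs.foldl pvStep s).word)
      = pvWordFold cs s.word s.last := by
  intro cs
  induction cs with
  | nil => intro s; rfl
  | cons c rest ih =>
    intro s
    simp only [List.foldl_cons, pvWordFold]
    rw [ih]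
    by_cases h : PySem.Chars.isspace c <;> simp [pvStep_word, pvStep_last, h]

theorem go_last : ∀ (cs cur : List Char) (acc : List (List Char)),
    ((PySem.Chars.split₀.go cs cur acc).getLast?).getD [] = pvWordFold cs cur.reverse ((acc.head?).getD []) := by
  intro cs
  induction cs with
  | nil =>
    intro cur acc
    by_cases h : cur.isEmpty <;> simp [PySem.Chars.split₀.go, h, pvWordFold]
  | cons c rest ih =>
    intro cur acc
    by_cases hs : PySem.Chars.isspace c
    · by_cases hc : cur.isEmpty
      · have : cur = [] := by simpa using hc
        simp [PySem.Chars.split₀.go, hs, hc, pvWordFold, ih, this]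
      · have hrev : cur.reverse.isEmpty = false := by
          simp only [List.isEmpty_reverse]
          simpa using hc
        have hgo : PySem.Chars.split₀.go (c :: rest) cur acc = PySem.Chars.split₀.go rest [] (cur.reverse :: acc) := by
          simp [PySem.Chars.split₀.go, hs, hc]
        rw [hgo, ih]
        simp [pvWordFold, hs, hrev]
    · simp [PySem.Chars.split₀.go, hs, pvWordFold, ih]

-- inEq stays false
theorem pvStep_inEq (s : pvSt) (c : Char) (h : s.inEq = false) : (pvStep s c).inEq = false := by
  unfold pvStep
  by_cases hs : PySem.Chars.isspace c <;> simp [hs, h] <;> split_ifs <;> rfl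

-- with inEq already false, the skip branch never fires; the other components evolve plainly
theorem pvStep_rest (s : pvSt) (c : Char) (h : s.inEq = false) :
    (pvStep s c).rest = s.rest ++ [c] := by
  unfold pvStep
  by_cases hs : PySem.Chars.isspace c <;> simp [hs, h] <;> split_ifs <;> rfl

theorem pvStep_allp (s : pvSt) (c : Char) (h : s.inEq = false) :
    (pvStep s c).allp = (s.allp && pvIsPunct c) := by
  unfold pvStep
  by_cases hs : PySem.Chars.isspace c <;> simp [hs, h] <;> split_ifs <;> rfl

theorem foldl_rest : ∀ (cs : List Char) (s : pvSt), s.inEq = false →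
    (cs.foldl pvStep s).rest = s.rest ++ cs := by
  intro cs
  induction cs with
  | nil => intro s _; simp
  | cons c rest ih =>
    intro s h
    simp only [List.foldl_cons]
    rw [ih _ (pvStep_inEq s c h), pvStep_rest s c h]
    simp

theorem foldl_allp : ∀ (cs : List Char) (s : pvSt), s.inEq = false →
    (cs.foldl pvStep s).allp = (s.allp && cs.all pvIsPunct) := by
  intro cs
  induction cs with
  | nil => intro s _; simp
  | cons c rest ih =>
    intro s h
    simp only [List.foldl_cons]
    rw [ih _ (pvStep_inEq s c h), pvStep_allp s c h]
    simp [Bool.and_assoc]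

-- colon/quote/tok transitions (inEq = false throughout)
-- after the quote: everything frozen
theorem pvStep_done (s : pvSt) (c : Char) (h : s.inEq = false)
    (h1 : s.seenColon = true) (h2 : s.seenQuote = true) :
    (pvStep s c).seenColon = true ∧ (pvStep s c).seenQuote = true ∧ (pvStep s c).tok = s.tok := by
  unfold pvStep
  by_cases hs : PySem.Chars.isspace c <;> simp [hs, h, h1, h2]

theorem foldl_done : ∀ (cs : List Char) (s : pvSt), s.inEq = false →
    s.seenColon = true → s.seenQuote = true →
    (cs.foldl pvStep s).seenQuote = true ∧ (cs.foldl pvStep s).tok = s.tok := by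
  intro cs
  induction cs with
  | nil => intro s _ _ h2; exact ⟨h2, rfl⟩
  | cons c rest ih =>
    intro s h h1 h2
    obtain ⟨a, b, d⟩ := pvStep_done s c h h1 h2
    simp only [List.foldl_cons]
    rw [← d]
    exact ih _ (pvStep_inEq s c h) a b

-- between the colon and the quote
theorem pvStep_mid (s : pvSt) (c : Char) (h : s.inEq = false)
    (h1 : s.seenColon = true) (h2 : s.seenQuote = false) :
    (pvStep s c).seenColon = true ∧
    (if c = '\'' then (pvStep s c).seenQuote = true ∧ (pvStep s c).tok = s.tok
     else (pvStep s c).seenQuote = false ∧ (pvStep s c).tok = s.tok ++ [c]) := by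
  by_cases hq : c = '\''
  · subst hq
    unfold pvStep
    simp [h, h1, h2, (by decide : PySem.Chars.isspace '\'' = false)]
  · unfold pvStep
    by_cases hs : PySem.Chars.isspace c <;> simp [hs, h, h1, h2, hq]

theorem foldl_mid : ∀ (cs : List Char) (s : pvSt) (pre2 suf2: List Char) (f : Bool),
    s.inEq = false → s.seenColon = true → s.seenQuote = false →
    pvPartition cs '\'' = (pre2, f, suf2) →
    (f = true → (cs.foldl pvStep s).seenQuote = true ∧ (cs.foldl pvStep s).tok = s.tok ++ pre2) ∧
    (f = false → (cs.foldl pvStep s).seenQuote = false) := by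
  intro cs
  induction cs with
  | nil =>
    intro s pre2 suf2 f h h1 h2 hp
    have hp' : (([] : List Char), false, ([] : List Char)) = (pre2, f, suf2) := by
      rw [← hp]; simp [pvPartition]
    cases hp'
    exact ⟨by intro hf; simp at hf, fun _ => h2⟩
  | cons c rest ih =>
    intro s pre2 suf2 f h h1 h2 hp
    obtain ⟨ha, hb⟩ := pvStep_mid s c h h1 h2
    by_cases hq : c = '\''
    · subst hq
      rw [if_pos rfl] at hb
      have hp' : (([] : List Char), true, rest) = (pre2, f, suf2) := by
        rw [← hp]; simp [pvPartition]
      injection hp' with e1 e23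
      injection e23 with e2 e3
      subst e1; subst e2; subst e3
      refine ⟨fun _ => ?_, by intro hf; simp at hf⟩
      obtain ⟨d1, d2⟩ := foldl_done rest _ (pvStep_inEq s _ h) ha hb.1
      simp only [List.foldl_cons]
      exact ⟨d1, by rw [d2, hb.2]; simp⟩
    · rw [if_neg hq] at hb
      rcases hpr : pvPartition rest '\'' with ⟨p, f', sfx⟩
      have hp' : (c :: p, f', sfx) = (pre2, f, suf2) := by
        rw [← hp]; simp [pvPartition, hq, hpr]
      injection hp' with e1 e23
      injection e23 with e2 e3
      subst e1; subst e2; subst e3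
      have := ih (pvStep s c) p sfx f' (pvStep_inEq s c h) ha hb.1 hpr
      refine ⟨fun hf => ?_, fun hf => ?_⟩
      · obtain ⟨d1, d2⟩ := this.1 hf
        simp only [List.foldl_cons]
        exact ⟨d1, by rw [d2, hb.2]; simp⟩
      · simpa using this.2 hf

-- before the colon
theorem pvStep_pre (s : pvSt) (c : Char) (h : s.inEq = false)
    (h1 : s.seenColon = false) (h2 : s.seenQuote = false) :
    (if c = ':' then (pvStep s c).seenColon = true else (pvStep s c).seenColon = false) ∧
    (pvStep s c).seenQuote = false ∧ (pvStep s c).tok = s.tok := by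
  by_cases hc : c = ':'
  · subst hc
    unfold pvStep
    simp [h, h1, h2, (by decide : PySem.Chars.isspace ':' = false)]
  · unfold pvStep
    by_cases hs : PySem.Chars.isspace c <;> simp [hs, h, h1, h2, hc]

theorem foldl_pre : ∀ (cs : List Char) (s : pvSt) (pre after : List Char) (f : Bool),
    s.inEq = false → s.seenColon = false → s.seenQuote = false →
    pvPartition cs ':' = (pre, f, after) →
    (f = true → ∀ (pre2 suf2 : List Char) (f2 : Bool), pvPartition after '\'' = (pre2, f2, suf2) →
      (f2 = true → (cs.foldl pvStep s).seenQuote = true ∧ (cs.foldl pvStep s).tok = s.tok ++ pre2) ∧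
      (f2 = false → (cs.foldl pvStep s).seenQuote = false)) ∧
    (f = false → (cs.foldl pvStep s).seenQuote = false) := by
  intro cs
  induction cs with
  | nil =>
    intro s pre after f h h1 h2 hp
    have hp' : (([] : List Char), false, ([] : List Char)) = (pre, f, after) := by
      rw [← hp]; simp [pvPartition]
    cases hp'
    exact ⟨by intro hf; simp at hf, fun _ => h2⟩
  | cons c rest ih =>
    intro s pre after f h h1 h2 hp
    obtain ⟨ha, hb, hc'⟩ := pvStep_pre s c h h1 h2
    by_cases hcc : c = ':'
    · subst hcc
      rw [if_pos rfl] at ha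
      have hp' : (([] : List Char), true, rest) = (pre, f, after) := by
        rw [← hp]; simp [pvPartition]
      injection hp' with e1 e23
      injection e23 with e2 e3
      subst e1; subst e2; subst e3
      refine ⟨fun _ pre2 suf2 f2 hp2 => ?_, by intro hf; simp at hf⟩
      have := foldl_mid rest (pvStep s ':') pre2 suf2 f2 (pvStep_inEq s _ h) ha hb hp2
      refine ⟨fun hf => ?_, fun hf => ?_⟩
      · obtain ⟨d1, d2⟩ := this.1 hf
        exact ⟨d1, by rw [List.foldl_cons, d2, hc']⟩
      · simpa using this.2 hf
    · rw [if_neg hcc] at ha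
      rcases hpr : pvPartition rest ':' with ⟨p, f', sfx⟩
      have hp' : (c :: p, f', sfx) = (pre, f, after) := by
        rw [← hp]; simp [pvPartition, hcc, hpr]
      injection hp' with e1 e23
      injection e23 with e2 e3
      subst e1; subst e2; subst e3
      have := ih (pvStep s c) p sfx f' (pvStep_inEq s c h) ha hb hpr
      refine ⟨fun hf pre2 suf2 f2 hp2 => ?_, fun hf => ?_⟩
      · have h2' := this.1 hf pre2 suf2 f2 hp2
        refine ⟨fun hf2 => ?_, fun hf2 => ?_⟩
        · obtain ⟨d1, d2⟩ := h2'.1 hf2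
          exact ⟨d1, by rw [List.foldl_cons, d2, hc']⟩
        · simpa using h2'.2 hf2
      · simpa using this.2 hf

-- the leading '=' run only grows `word`
theorem foldl_eqrun : ∀ (es : List Char) (s : pvSt), (∀ c ∈ es, c = '=') → s.inEq = true →
    es.foldl pvStep s = { s with word := s.word ++ es } := by
  intro es
  induction es with
  | nil => intro s _ _; simp
  | cons c rest ih =>
    intro s hall h
    have hc : c = '=' := hall c (by simp)
    subst hc
    have hstep : pvStep s '=' = { s with word := s.word ++ ['='] } := by
      unfold pvStep
      have : PySem.Chars.isspace '=' = false := by decide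
      simp [this, h]
    simp only [List.foldl_cons, hstep]
    rw [ih _ (fun c hc => hall c (by simp [hc])) (by simpa using h)]
    simp

-- first non-'=' char: skip branch cannot fire, so inEq may be forced to false beforehand
theorem pvStep_force (s : pvSt) (c : Char) (h : c ≠ '=') :
    pvStep s c = pvStep { s with inEq := false } c := by
  unfold pvStep
  by_cases hs : PySem.Chars.isspace c <;> simp [hs, h]

-- the whole per-line correspondence: B's state machine = the partition-style parser
theorem lineBC (line : String) : pvLineB line = pvParseLine line := by
  by_cases hsw : PySem.Str.startswith line "=" = true
  · simp only [pvLineB, pvParseLine, hsw, if_true]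
    -- split the line into the '=' run and the remainder
    have hsplit : line.toList = line.toList.takeWhile (· = '=') ++ line.toList.dropWhile (· = '=') :=
      (List.takeWhile_append_dropWhile).symm
    have hall : ∀ c ∈ line.toList.takeWhile (· = '='), c = '=' := by
      intro c hc
      have := List.mem_takeWhile_imp hc
      simpa using this
    -- word component: over the whole line
    have hword : (if (line.toList.foldl pvStep pvInit).word.isEmpty then (line.toList.foldl pvStep pvInit).last
        else (line.toList.foldl pvStep pvInit).word) = pvWordFold line.toList [] [] := foldl_word _ _
    have hwords : (PySem.Str.split₀ line).getLast?.getD "" = String.ofList (pvWordFold line.toList [] []) := by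
      have h2 : ((PySem.Chars.split₀ line.toList).getLast?).getD [] = pvWordFold line.toList [] [] := by
        have h3 := go_last line.toList [] []
        rw [PySem.Chars.split₀]
        rw [h3]
        simp
      rw [← PySem.Str.split₀_map_toList, List.getLast?_map] at h2
      rcases hL : (PySem.Str.split₀ line).getLast? with _ | a
      · rw [hL] at h2
        simp only [Option.map_none, Option.getD_none] at h2
        rw [← h2]
        rfl
      · rw [hL] at h2
        simp only [Option.map_some, Option.getD_some] at h2
        rw [← h2]
        simp
    rcases hr : line.toList.dropWhile (· = '=') with _ | ⟨c0, r'⟩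
    · -- the whole line is '='s: fold = initial state with word := eqs; allp = true; both give punct
      have hfold : line.toList.foldl pvStep pvInit = { pvInit with word := pvInit.word ++ line.toList.takeWhile (· = '=') } := by
        conv_lhs => rw [hsplit]
        rw [List.foldl_append, foldl_eqrun _ _ hall rfl, hr]
        simp
      rw [hfold]
      simp [pvInit]
    · have hc0 : ¬ (c0 = '=') := by
        have := List.head?_dropWhile_not (fun c => decide (c = '=')) line.toList
        rw [hr] at this
        simpa using this
      have hfold : line.toList.foldl pvStep pvInit
          = (c0 :: r').foldl pvStep { pvInit with word := line.toList.takeWhile (· = '=') } := by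
        conv_lhs => rw [hsplit]
        rw [List.foldl_append, foldl_eqrun _ _ hall rfl, hr]
        rfl
      have hforce : (c0 :: r').foldl pvStep { pvInit with word := line.toList.takeWhile (· = '=') }
          = (c0 :: r').foldl pvStep { pvInit with inEq := false, word := line.toList.takeWhile (· = '=') } := by
        simp only [List.foldl_cons]
        rw [pvStep_force _ _ hc0]
      set sF : pvSt := { pvInit with inEq := false, word := line.toList.takeWhile (· = '=') } with hsF
      have hF : sF.inEq = false := rfl
      have hrest : (line.toList.foldl pvStep pvInit).rest = c0 :: r' := by
        rw [hfold, hforce, foldl_rest _ _ hF]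
        rfl
      have hallp : (line.toList.foldl pvStep pvInit).allp = (c0 :: r').all pvIsPunct := by
        rw [hfold, hforce, foldl_allp _ _ hF]
        rfl
      try simp only [hr]
      by_cases hpunct : (c0 :: r').all pvIsPunct = true
      · rw [if_pos hpunct, if_pos (by rw [hallp]; exact hpunct), hrest]
      · rw [if_neg hpunct, if_neg (by rw [hallp]; exact hpunct)]
        rcases hp1 : pvPartition (c0 :: r') ':' with ⟨pre1, colon, after⟩
        have hcq := foldl_pre (c0 :: r') sF pre1 after colon hF rfl rfl hp1
        cases colon with
        | false =>
          have : (line.toList.foldl pvStep pvInit).seenQuote = false := by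
            rw [hfold, hforce]
            exact hcq.2 rfl
          rw [this]
          simp
        | true =>
          rcases hp2 : pvPartition after '\'' with ⟨pre2, quote, suf2⟩
          have hq := hcq.1 rfl pre2 suf2 quote hp2
          cases quote with
          | false =>
            have : (line.toList.foldl pvStep pvInit).seenQuote = false := by
              rw [hfold, hforce]
              exact hq.2 rfl
            rw [this]
            simp
          | true =>
            obtain ⟨d1, d2⟩ := hq.1 rfl
            rw [hfold, hforce] at hword ⊢
            rw [d1, if_pos rfl, d2]
            rw [hwords, hword]
            simp [hsF, pvInit]
  · unfold pvLineB pvParseLine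
    rw [if_neg hsw, if_neg hsw]

-- ===== VERDICT (by name: the statement is the Claim_ definition above) =====
theorem extract_from_sample_spec : Claim_equal_extract_from_sample := by
  intro sample _ _
  unfold Spec_extract_from_sample extract_from_sample extract_from_sample_alt
  generalize ((PySem.Str.split? sample "\n").getD []) = lines
  suffices h : ∀ (acc : List (List String)), lines.foldl _ acc = acc ++ lines.filterMap pvLineB by
    simpa using h []
  induction lines with
  | nil => intro acc; simp
  | cons l t ih =>
    intro acc
    simp only [List.foldl_cons]
    rw [perLine acc l, ← lineBC]
    cases h : pvLineB l with
    | none => simpa [h] using ih acc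
    | some r => simpa [h, List.append_assoc] using ih (acc ++ [r])
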